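-- pv_equiv track=rewrite | github.com/erjan/coding_exercises | replace_elements_in_an_array.py | arrayChange
-- ===== SOURCE A (Python) =====
-- from typing import List
--
-- def arrayChange(nums: List[int], operations: List[List[int]]) -> List[int]:
--
--     swaps = {}
--     for s, e in reversed(operations):
--         swaps[s] = swaps[e] if e in swaps else e
--     for i, num in enumerate(nums):
--         if num in swaps:
--             nums[i] = swaps[num]
--     return nums
-- ===== SOURCE B (Python) =====
-- from typing import List
--
-- def arrayChange(nums: List[int], operations: List[List[int]]) -> List[int]:
--     # Replay each operation in forward order: replace every occurrence of s by e.
--     # (Mutates nums in place, like A.)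
--     for s, e in operations:
--         for i in range(len(nums)):
--             if nums[i] == s:
--                 nums[i] = e
--     return nums
-- ===== Notes on version B (the rewrite author's own statement) =====
-- stated objective: simpler
-- what changed: B drops A's reverse-built chained swap table entirely and just replays each operation forward, scanning nums and replacing every occurrence; O(n*m) instead of A's O(n+m) single table pass.
import Mathlib
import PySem

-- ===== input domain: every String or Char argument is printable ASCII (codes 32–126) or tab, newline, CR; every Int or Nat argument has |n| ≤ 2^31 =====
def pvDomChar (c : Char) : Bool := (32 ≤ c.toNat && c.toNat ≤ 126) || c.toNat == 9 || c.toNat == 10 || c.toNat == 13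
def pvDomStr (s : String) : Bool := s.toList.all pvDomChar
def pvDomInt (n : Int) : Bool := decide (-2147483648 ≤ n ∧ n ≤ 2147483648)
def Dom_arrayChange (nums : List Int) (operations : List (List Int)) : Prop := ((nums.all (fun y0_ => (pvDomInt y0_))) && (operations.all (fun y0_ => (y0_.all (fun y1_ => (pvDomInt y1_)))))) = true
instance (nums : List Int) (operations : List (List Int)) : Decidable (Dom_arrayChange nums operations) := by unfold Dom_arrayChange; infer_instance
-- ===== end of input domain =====

-- B replaces A's reverse-built chained swap table by a plain forward replay of each
-- operation over the array (simpler, slower). Both A and B mutate `nums` in place in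
-- Python; the equivalence proved here is about the return value.


-- ===== PORT A =====
-- swaps = {}; for s, e in reversed(operations): swaps[s] = swaps[e] if e in swaps else e
-- then one pass over nums replacing num by swaps[num] when present.
-- (An operation not of length 2 raises ValueError in Python; those inputs are
--  outside Pre_arrayChange, the port skips such an op.)
def arrayChange (nums : List Int) (operations : List (List Int)) : List Int :=
  let swaps : PySem.Dict Int Int :=
    operations.reverse.foldl (fun d op =>
      match op with
      | [s, e] => d.insert s (if d.contains e then d.getD e e else e)
      | _ => d) PySem.Dict.empty
  nums.map (fun num => if swaps.contains num then swaps.getD num num else num)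

-- ===== PORT B =====
-- for s, e in operations: for i in range(len(nums)): if nums[i] == s: nums[i] = e
-- ('s, e = op' unpacking rendered as a length-2 guard + positional reads; an op of
--  another length raises in Python and is outside Pre_arrayChange, the port skips it.)
def arrayChange_alt (nums : List Int) (operations : List (List Int)) : List Int :=
  operations.foldl (fun acc op =>
    if op.length = 2 then
      let s := op.getD 0 0
      let e := op.getD 1 0
      acc.map (fun x => if x == s then e else x)
    else acc) nums

-- ===== PRECONDITION & SPEC =====
-- Pre_ excludes exactly the inputs on which Python A raises: the tuple unpacking
-- 'for s, e in reversed(operations)' raises ValueError unless every operation has length 2.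
def Pre_arrayChange (nums : List Int) (operations : List (List Int)) : Prop :=
  ∀ op ∈ operations, op.length = 2
instance (nums : List Int) (operations : List (List Int)) : Decidable (Pre_arrayChange nums operations) := by unfold Pre_arrayChange; infer_instance
def pvWitness_arrayChange : List Int × List (List Int) := ([1, 2, 4, 6], [[1, 3], [4, 7], [6, 1]])

def Spec_arrayChange (nums : List Int) (operations : List (List Int)) (out : List Int) : Prop := out = arrayChange_alt nums operations
instance (nums : List Int) (operations : List (List Int)) (out : List Int) : Decidable (Spec_arrayChange nums operations out) := by unfold Spec_arrayChange; infer_instance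

-- ===== CLAIM (what is proved, stated in full; the proofs are below) =====
def Claim_equal_arrayChange : Prop := ∀ (nums : List Int) (operations : List (List Int)), Dom_arrayChange nums operations → Pre_arrayChange nums operations → Spec_arrayChange nums operations (arrayChange nums operations)

-- ===== LEMMAS AND PROOFS =====

-- Forward application of an operation list to a single value.
def pvApply (ops : List (List Int)) (v : Int) : Int :=
  ops.foldl (fun v op =>
    match op with
    | [s, e] => if v = s then e else v
    | _ => v) v

-- The table A builds over reversed ops maps each value to its forward image.
def pvTable (ops : List (List Int)) : PySem.Dict Int Int :=
  ops.foldr (fun op d =>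
    match op with
    | [s, e] => d.insert s (if d.contains e then d.getD e e else e)
    | _ => d) PySem.Dict.empty

lemma pvTable_getD (ops : List (List Int)) (v : Int) :
    (if (pvTable ops).contains v then (pvTable ops).getD v v else v) = pvApply ops v := by
  induction ops generalizing v with
  | nil => simp [pvTable, pvApply, PySem.Dict.contains_empty]
  | cons op rest ih =>
    match op with
    | [] => simpa [pvTable, pvApply] using ih v
    | [_] => simpa [pvTable, pvApply] using ih v
    | s :: e :: _ :: _ => simpa [pvTable, pvApply] using ih v
    | [s, e] =>
      simp only [pvTable, List.foldr_cons, pvApply, List.foldl_cons]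
      by_cases hv : v = s
      · subst hv
        have htbl : (if (pvTable rest).contains e then (pvTable rest).getD e e else e)
            = pvApply rest e := ih e
        simp only [pvTable] at htbl
        simp [PySem.Dict.contains_insert_self, htbl, pvApply]
      · have h := ih v
        simp only [pvTable, pvApply] at h ⊢
        simp [PySem.Dict.contains_insert, PySem.Dict.getD_insert, hv, h]

lemma pvApply_nil : pvApply [] = id := rfl

-- Replaying the operations over a list is mapping pvApply over it.
lemma pvReplay_eq_map (ops : List (List Int)) (nums : List Int) :
    arrayChange_alt nums ops = nums.map (pvApply ops) := by
  induction ops generalizing nums with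
  | nil => simp [arrayChange_alt, pvApply_nil]
  | cons op rest ih =>
    match op with
    | [] => simpa [arrayChange_alt] using ih nums
    | [_] => simpa [arrayChange_alt] using ih nums
    | _ :: _ :: _ :: _ => simpa [arrayChange_alt] using ih nums
    | [s, e] =>
      rw [show arrayChange_alt nums ([s, e] :: rest)
            = arrayChange_alt (nums.map fun x => if x == s then e else x) rest
          from rfl, ih]
      simp [pvApply, List.map_map, Function.comp_def]

-- ===== VERDICT (by name: the statement is the Claim_ definition above) =====
theorem arrayChange_spec : Claim_equal_arrayChange := by
  intro nums operations _ _
  unfold Spec_arrayChange arrayChange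
  rw [pvReplay_eq_map]
  have hswaps : operations.reverse.foldl (fun d op =>
      match op with
      | [s, e] => d.insert s (if d.contains e then d.getD e e else e)
      | _ => d) PySem.Dict.empty = pvTable operations := by
    rw [List.foldl_reverse]; rfl
  simp only [hswaps]
  exact List.map_congr_left fun v _ => pvTable_getD operations v
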